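-- pv_equiv track=rewrite | github.com/Dei1400/Dei1400 | Portafolio _1_DeilynSalazar_2020426180/2 formar_pares.py | formar_pares
-- ===== SOURCE A (Python) =====
-- def formar_pares(num):
--      if isinstance(num, int):
--           if num < 0 :
--                return formar_pares(num*-1) #multiplicar por menos uno para manejar solo positivos
--           if num == 0 : #para que cuente el 0 como par
--                return 1
--           else:
--                return formar_pares_aux(num, 0)#a la nueva función s ele manda un cero para manejar las potencias
--      else:                                    # a la hora de formar en nuevo número (num * 10 ** p)
--           return -1 #Mensaje de error en la entrada
--
-- def formar_pares_aux(num, p):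
--      if num == 0 : #este cero no es del número de la entrada
--           return 0
--      elif num == 1: #condiciones de parada
--           return 0
--      elif (num%10)%2 == 0 : #se saca el ultimo número y si el modulo de dos es igual a cero es un número par
--           return num%10 * 10 ** p + formar_pares_aux(num//10, p+1) #se le suma uno a p para la siguiente posición
--                  #se saca el ultimo número se multiplica por diez a la potencia de p
--      else :
--           return formar_pares_aux(num//10, p)
-- ===== SOURCE B (Python) =====
-- def formar_pares(num):
--     if not isinstance(num, int):
--         return -1
--     if num < 0:
--         num = -num
--     if num == 0:
--         return 1
--     result = 0
--     p = 0
--     while num > 0: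
--         d = num % 10
--         if d % 2 == 0:
--             result += d * 10 ** p
--             p += 1
--         num //= 10
--     return result
-- ===== Notes on version B (the rewrite author's own statement) =====
-- stated objective: idiomatic
-- what changed: Replaces the pair of mutually arranged recursive functions (with an explicit power accumulator threaded through recursion) by a single iterative digit loop with result/position accumulators.
import Mathlib
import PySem

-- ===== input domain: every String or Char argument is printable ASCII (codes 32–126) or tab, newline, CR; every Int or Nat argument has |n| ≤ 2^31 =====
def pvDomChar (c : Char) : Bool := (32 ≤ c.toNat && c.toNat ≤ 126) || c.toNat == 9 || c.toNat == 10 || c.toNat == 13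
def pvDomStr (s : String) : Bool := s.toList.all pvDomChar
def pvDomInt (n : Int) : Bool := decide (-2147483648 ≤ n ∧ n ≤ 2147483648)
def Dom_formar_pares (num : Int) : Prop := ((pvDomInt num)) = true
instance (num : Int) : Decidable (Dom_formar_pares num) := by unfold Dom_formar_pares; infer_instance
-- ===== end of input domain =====

-- B replaces A's pair of recursive helper functions by a single iterative digit loop (more idiomatic; same cost).


-- ===== PORT A =====
-- Transliteration of A. formar_pares_aux is only reached with a positive
-- argument, so it is carried as a Nat (Python's // and % agree with Nat / and %
-- on nonnegative operands); the code is otherwise line for line A's.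
def formar_pares_auxA (num p : Nat) : Int :=
  if num = 0 then 0
  else if num = 1 then 0
  else if (num % 10) % 2 = 0 then
    (num % 10 : Int) * 10 ^ p + formar_pares_auxA (num / 10) (p + 1)
  else formar_pares_auxA (num / 10) p
termination_by num
decreasing_by all_goals exact Nat.div_lt_self (by omega) (by omega)

def formar_pares (num : Int) : Int :=
  if num < 0 then formar_pares (num * -1)
  else if num = 0 then 1
  else formar_pares_auxA num.toNat 0
termination_by (if num < 0 then 1 else 0 : Nat)
decreasing_by simp_all; omega

-- ===== PORT B =====
-- Transliteration of B's while loop: state (num, result, p).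
def formar_pares_loop (num : Nat) (result : Int) (p : Nat) : Int :=
  if num > 0 then
    let d := num % 10
    if d % 2 = 0 then formar_pares_loop (num / 10) (result + (d : Int) * 10 ^ p) (p + 1)
    else formar_pares_loop (num / 10) result p
  else result
termination_by num
decreasing_by all_goals exact Nat.div_lt_self (by omega) (by omega)

def formar_pares_alt (num : Int) : Int :=
  let n := num.natAbs
  if n = 0 then 1
  else formar_pares_loop n 0 0


-- ===== PRECONDITION & SPEC =====
def Spec_formar_pares (num : Int) (out : Int) : Prop := out = formar_pares_alt num
instance (num : Int) (out : Int) : Decidable (Spec_formar_pares num out) := by unfold Spec_formar_pares; infer_instance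

-- ===== CLAIM (what is proved, stated in full; the proofs are below) =====
def Claim_equal_formar_pares : Prop := ∀ (num : Int), Dom_formar_pares num → Spec_formar_pares num (formar_pares num)

-- ===== LEMMAS AND PROOFS =====

-- Loop invariant: B's loop returns its accumulator plus A's recursive sum.
theorem loop_eq_aux (n : Nat) : ∀ (r : Int) (p : Nat),
    formar_pares_loop n r p = r + formar_pares_auxA n p := by
  induction n using Nat.strong_induction_on with
  | _ n ih =>
    intro r p
    by_cases h0 : n = 0
    · subst h0; rw [formar_pares_loop, formar_pares_auxA]; simp
    · rw [formar_pares_loop, formar_pares_auxA]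
      simp only [if_neg h0, show n > 0 by omega, if_pos]
      by_cases h1 : n = 1
      · subst h1
        norm_num
        rw [formar_pares_loop]
        simp
      · simp only [if_neg h1]
        by_cases he : n % 10 % 2 = 0
        · simp only [if_pos he]
          rw [ih (n / 10) (Nat.div_lt_self (by omega) (by omega))]
          push_cast
          ring
        · simp only [if_neg he]
          exact ih (n / 10) (Nat.div_lt_self (by omega) (by omega)) r p

theorem pos_case (num : Int) (h : 0 < num) :
    formar_pares num = formar_pares_alt num := by
  rw [formar_pares, formar_pares_alt]
  have h1 : ¬ num < 0 := by omega
  have h2 : num ≠ 0 := by omega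
  have h3 : num.natAbs ≠ 0 := by omega
  have h4 : num.toNat = num.natAbs := by omega
  simp only [h1, if_false, h2, if_false, h3, h4]
  rw [loop_eq_aux]
  simp

-- ===== VERDICT (by name: the statement is the Claim_ definition above) =====
theorem formar_pares_spec : Claim_equal_formar_pares := by
  intro num _
  unfold Spec_formar_pares
  rcases lt_trichotomy num 0 with h | h | h
  · rw [formar_pares]
    simp only [h, if_pos]
    have hp : (0:Int) < num * -1 := by omega
    rw [pos_case _ hp]
    have hn : (num * -1).natAbs = num.natAbs := by omega
    rw [formar_pares_alt, formar_pares_alt, hn]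
  · subst h
    rw [formar_pares, formar_pares_alt]
    norm_num
  · exact pos_case num h
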